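-- pv_equiv track=rewrite | github.com/vinnytherobot/robotBuster | src/robotbuster/utils/wordlist.py | filter_extensions
-- ===== SOURCE A (Python) =====
-- from typing import List, Set, Optional
--
-- def filter_extensions(routes: List[str], extensions: Set[str]) -> List[str]:
--     """Filter routes by given extensions.
--
--     Args:
--         routes: List of routes
--         extensions: Set of allowed extensions (.php, .html)
--
--     Returns:
--         Filtered list of routes
--     """
--     if not extensions:
--         return routes
--
--     # Ensure extensions start with a dot
--     exts = {ext if ext.startswith('.') else f'.{ext}' for ext in extensions}
--
--     filtered = []
--     for route in routes:
--         # Add routes that either have the extension or are directories (no dot)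
--         if any(route.endswith(ext) for ext in exts) or '.' not in route:
--             filtered.append(route)
--
--     return filtered
-- ===== SOURCE B (Python) =====
-- def filter_extensions(routes, extensions):
--     """Filter routes by allowed extensions; directories (no dot) always pass."""
--     if not extensions:
--         return routes
--
--     extset = {e if e.startswith('.') else '.' + e for e in extensions}
--     lengths = {len(e) for e in extset}
--
--     return [r for r in routes
--             if '.' not in r or any(r[-L:] in extset for L in lengths)]
-- ===== Notes on version B (the rewrite author's own statement) =====
-- stated objective: faster
-- what changed: Instead of testing every route against every extension with endswith, B builds the set of normalised extensions and the set of their distinct lengths once, then for each route checks only its suffix of each distinct length by set membership.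
import Mathlib
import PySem

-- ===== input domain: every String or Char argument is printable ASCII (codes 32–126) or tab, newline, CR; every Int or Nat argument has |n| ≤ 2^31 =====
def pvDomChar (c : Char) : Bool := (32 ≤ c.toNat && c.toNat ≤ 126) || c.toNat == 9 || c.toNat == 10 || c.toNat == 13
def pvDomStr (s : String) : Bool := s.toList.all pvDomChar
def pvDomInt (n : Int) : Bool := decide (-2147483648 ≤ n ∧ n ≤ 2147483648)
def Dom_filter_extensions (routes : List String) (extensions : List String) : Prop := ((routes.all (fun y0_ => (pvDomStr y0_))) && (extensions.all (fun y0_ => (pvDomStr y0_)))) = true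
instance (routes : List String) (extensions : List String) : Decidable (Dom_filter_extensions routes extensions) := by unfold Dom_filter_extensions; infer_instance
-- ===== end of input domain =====

-- B groups the normalised extensions by length once, then tests each route's
-- suffix of each distinct length by set membership instead of scanning every
-- extension per route (objective: faster when there are many extensions).

-- ===== PORT A =====
-- A-side helper: ext if ext.startswith('.') else f'.{ext}'
def pvNormA (ext : String) : String :=
  if PySem.Str.startswith ext "." then ext else String.ofList ('.' :: ext.toList)

def filter_extensions (routes : List String) (extensions : List String) : List String :=
  if extensions = [] then routes
  else
    let exts : PySem.Set String := PySem.Set.ofList (extensions.map pvNormA)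
    routes.foldl (fun filtered route =>
      if (exts.any fun ext => PySem.Str.endswith route ext) || !(PySem.Str.isIn "." route)
      then filtered ++ [route] else filtered) []

-- ===== PORT B =====
-- B-side helper: e if e.startswith('.') else '.' + e
def pvNormB (e : String) : String :=
  if PySem.Str.startswith e "." then e else String.ofList ('.' :: e.toList)

def filter_extensions_alt (routes : List String) (extensions : List String) : List String :=
  if extensions = [] then routes
  else
    let extset : PySem.Set String := PySem.Set.ofList (extensions.map pvNormB)
    let lengths : PySem.Set Int := PySem.Set.ofList (extset.map PySem.Str.len)
    routes.filter fun r =>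
      !(PySem.Str.isIn "." r) ||
        (lengths.any fun L => PySem.Set.contains extset (PySem.Str.slice r (some (-L)) none))

-- ===== PRECONDITION & SPEC =====
def Spec_filter_extensions (routes : List String) (extensions : List String) (out : List String) : Prop := out = filter_extensions_alt routes extensions
instance (routes : List String) (extensions : List String) (out : List String) : Decidable (Spec_filter_extensions routes extensions out) := by unfold Spec_filter_extensions; infer_instance

-- ===== CLAIM (what is proved, stated in full; the proofs are below) =====
def Claim_equal_filter_extensions : Prop := ∀ (routes : List String) (extensions : List String), Dom_filter_extensions routes extensions → Spec_filter_extensions routes extensions (filter_extensions routes extensions)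

-- ===== LEMMAS AND PROOFS =====

-- Every normalised extension is a nonempty string.
lemma pv_norm_ne_nil (e : String) : (pvNormA e).toList ≠ [] := by
  unfold pvNormA
  split
  · rename_i h
    rw [PySem.Str.startswith_eq] at h
    rw [PySem.Chars.startswith_iff] at h
    intro hnil
    rw [hnil] at h
    simpa using h.length_le
  · rw [String.toList_ofList]
    simp

-- The suffix of r of the length of any ext in S is in the set S  ↔  some ext in S is a suffix of r.
lemma pv_any_eq (r : String) (S : List String) (hS : ∀ e ∈ S, e.toList ≠ []) :
    (S.any fun ext => PySem.Str.endswith r ext) =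
      ((PySem.Set.ofList (S.map PySem.Str.len)).any fun L =>
        PySem.Set.contains S (PySem.Str.slice r (some (-L)) none)) := by
  cases hL : (S.any fun ext => PySem.Str.endswith r ext) with
  | true =>
    -- LHS true: some ext e is a suffix of r; its length witnesses the RHS
    symm
    rw [List.any_eq_true] at hL ⊢
    rcases hL with ⟨e, heS, hend⟩
    refine ⟨PySem.Str.len e, ?_, ?_⟩
    · rw [PySem.Set.mem_ofList]
      exact List.mem_map.mpr ⟨e, heS, rfl⟩
    · rw [PySem.Str.endswith_eq, PySem.Chars.endswith_iff] at hend
      have hk : 0 < e.toList.length := List.length_pos_iff.mpr (hS e heS)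
      have hslice : PySem.Str.slice r (some (-PySem.Str.len e)) none = e := by
        rw [← String.toList_inj, PySem.Str.toList_slice, PySem.Chars.slice_eq_listSlice,
          PySem.Str.len_eq, PySem.List.slice_from_neg_natCast _ _ hk]
        rcases hend with ⟨t, ht⟩
        have hlen : t.length = r.toList.length - e.toList.length := by
          have := congrArg List.length ht
          rw [List.length_append] at this
          omega
        rw [← hlen, ← ht, List.drop_left]
      rw [hslice]
      simpa [PySem.Set.contains, List.contains_iff_mem] using heS
  | false =>
    -- LHS false: no ext in S is a suffix of r; show RHS false
    symm
    rw [List.any_eq_false] at hL ⊢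
    intro L hLmem
    rw [PySem.Set.mem_ofList] at hLmem
    simp only [Bool.not_eq_true]
    rcases List.mem_map.mp hLmem with ⟨e0, he0, rfl⟩
    by_contra hcon
    rw [Bool.not_eq_false] at hcon
    have hmem : PySem.Str.slice r (some (-PySem.Str.len e0)) none ∈ S := by
      simpa [PySem.Set.contains, List.contains_iff_mem] using hcon
    have := hL _ hmem
    apply this
    rw [PySem.Str.endswith_eq, PySem.Chars.endswith_iff, PySem.Str.toList_slice,
      PySem.Chars.slice_eq_listSlice]
    have hk : 0 < e0.toList.length := List.length_pos_iff.mpr (hS e0 he0)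
    rw [PySem.Str.len_eq, PySem.List.slice_from_neg_natCast _ _ hk]
    exact List.drop_suffix _ _

-- ===== VERDICT (by name: the statement is the Claim_ definition above) =====
theorem filter_extensions_spec : Claim_equal_filter_extensions := by
  intro routes extensions _
  unfold Spec_filter_extensions filter_extensions filter_extensions_alt
  by_cases hne : extensions = []
  · simp [hne]
  · simp only [hne, if_false]
    have hnorm : pvNormB = pvNormA := rfl
    rw [hnorm]
    set S : PySem.Set String := PySem.Set.ofList (extensions.map pvNormA) with hSdef
    have hSne : ∀ e ∈ S, e.toList ≠ [] := by
      intro e he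
      rw [hSdef, PySem.Set.mem_ofList] at he
      rcases List.mem_map.mp he with ⟨x, _, rfl⟩
      exact pv_norm_ne_nil x
    have hfold := PySem.List.foldl_append_if
      (p := fun route => (S.any fun ext => PySem.Str.endswith route ext) || !(PySem.Str.isIn "." route))
      (f := (id : String → String)) routes []
    simp only [id_eq, List.map_id, List.nil_append] at hfold
    rw [hfold]
    apply List.filter_congr
    intro r _
    rw [pv_any_eq r S hSne, Bool.or_comm]
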